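-- pv_equiv track=rewrite | github.com/dorel14/SoniqueBay | backend_worker/background_tasks/worker_insert_bulk.py | _group_metadata_by_entities
-- ===== SOURCE A (Python) =====
-- from typing import List, Dict, Any, Optional
--
-- def _group_metadata_by_entities(metadata: List[Dict[str, Any]]) -> Dict[str, Dict[str, List[Dict[str, Any]]]]:
--     """
--     Regroupe les métadonnées par artiste pour optimiser les insertions.
--
--     Args:
--         metadata: Liste des métadonnées
--
--     Returns:
--         Données groupées par artiste
--     """
--     grouped = {}
--
--     for meta in metadata:
--         artist_name = meta.get("artist", "Unknown Artist")
--         if artist_name not in grouped: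
--             grouped[artist_name] = {
--                 "artists": [{"name": artist_name}],
--                 "albums": [],
--                 "tracks": []
--             }
--
--         # Ajouter l'album s'il n'existe pas
--         album_title = meta.get("album", "Unknown Album")
--         album_key = album_title
--         existing_albums = [a["title"] for a in grouped[artist_name]["albums"]]
--
--         if album_title not in existing_albums:
--             grouped[artist_name]["albums"].append({
--                 "title": album_title,
--                 "artist_name": artist_name
--             })
--
--         # Ajouter la track
--         grouped[artist_name]["tracks"].append(meta)
--
--     return grouped
-- ===== SOURCE B (Python) =====
-- def _group_metadata_by_entities(metadata):
--     # Phase 1: group tracks by artist, preserving first-encounter order.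
--     by_artist = {}
--     for meta in metadata:
--         by_artist.setdefault(meta.get("artist", "Unknown Artist"), []).append(meta)
--
--     # Phase 2: per artist, derive the album list (dedup by title, first occurrence).
--     result = {}
--     for artist, tracks in by_artist.items():
--         seen = set()
--         albums = []
--         for meta in tracks:
--             title = meta.get("album", "Unknown Album")
--             if title not in seen:
--                 seen.add(title)
--                 albums.append({"title": title, "artist_name": artist})
--         result[artist] = {
--             "artists": [{"name": artist}],
--             "albums": albums,
--             "tracks": tracks,
--         }
--     return result
-- ===== Notes on version B (the rewrite author's own statement) =====
-- stated objective: alternative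
-- what changed: Replaces A's single interleaved loop (which rebuilds each artist's existing-album title list and appends into the nested dict on every track) by a two-phase decomposition: one pass grouping tracks by artist, then a per-artist pass deriving the deduped album list with a seen-titles set and assembling each group at once.
import Mathlib
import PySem

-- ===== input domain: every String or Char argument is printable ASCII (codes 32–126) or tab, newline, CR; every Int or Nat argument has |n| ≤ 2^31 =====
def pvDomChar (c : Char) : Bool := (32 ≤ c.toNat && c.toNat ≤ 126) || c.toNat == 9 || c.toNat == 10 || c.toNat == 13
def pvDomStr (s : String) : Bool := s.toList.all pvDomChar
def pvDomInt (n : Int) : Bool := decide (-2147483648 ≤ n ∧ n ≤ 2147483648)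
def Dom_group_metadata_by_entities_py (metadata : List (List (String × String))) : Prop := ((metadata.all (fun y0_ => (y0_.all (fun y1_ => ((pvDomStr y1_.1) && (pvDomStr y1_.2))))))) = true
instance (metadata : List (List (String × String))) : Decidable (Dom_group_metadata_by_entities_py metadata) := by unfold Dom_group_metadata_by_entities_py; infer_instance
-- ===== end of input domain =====

-- B replaces A's interleaved loop by a two-phase decomposition (group tracks by artist,
-- then derive each artist's deduped album list); same result, alternative structure.

-- mta.get(key, dflt): first matching key in the association list (exact: Python dict lookup)
def pvMetaGet (mta : List (String × String)) (key dflt : String) : String :=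
  match mta with
  | [] => dflt
  | (k, v) :: rest => if k == key then v else pvMetaGet rest key dflt

-- ===== PORT A =====

-- g[key] for the per-artist group dict (keys "artists"/"albums"/"tracks", always present;
-- the [] default is unreachable since A only reads keys it created)
def pvGetG (g : List (String × List (List (String × String)))) (key : String) :
    List (List (String × String)) :=
  match g with
  | [] => []
  | (k, v) :: r => if k == key then v else pvGetG r key

-- in-place g[key].append(…), rendered as replacing the value at the first matching key
def pvSetG (g : List (String × List (List (String × String)))) (key : String)
    (v : List (List (String × String))) : List (String × List (List (String × String))) :=
  match g with
  | [] => []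
  | (k, w) :: r => if k == key then (k, v) :: r else (k, w) :: pvSetG r key v

-- loop body acting on one entry of `grouped` (only the entry keyed by artist changes)
def pvAUpdate (artist album : String) (mta : List (String × String))
    (e : String × List (String × List (List (String × String)))) :
    String × List (String × List (List (String × String))) :=
  if e.1 == artist then
    -- existing_albums = [a["title"] for a in grouped[artist]["albums"]] ("title" always present)
    let existing := (pvGetG e.2 "albums").map (fun a => pvMetaGet a "title" "")
    let g := if album ∈ existing then e.2
             else pvSetG e.2 "albums"
                    (pvGetG e.2 "albums" ++ [[("title", album), ("artist_name", artist)]])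
    (e.1, pvSetG g "tracks" (pvGetG g "tracks" ++ [mta]))
  else e

-- one iteration of A's for-loop
def pvAStep (grouped : List (String × List (String × List (List (String × String)))))
    (mta : List (String × String)) :
    List (String × List (String × List (List (String × String)))) :=
  ((if grouped.any (fun e => e.1 == pvMetaGet mta "artist" "Unknown Artist") then grouped
    else grouped ++ [(pvMetaGet mta "artist" "Unknown Artist",
      [("artists", [[("name", pvMetaGet mta "artist" "Unknown Artist")]]),
       ("albums", []), ("tracks", [])])]).map
    (pvAUpdate (pvMetaGet mta "artist" "Unknown Artist")
      (pvMetaGet mta "album" "Unknown Album") mta))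

def group_metadata_by_entities_py (metadata : List (List (String × String))) :
    List (String × List (String × List (List (String × String)))) :=
  metadata.foldl pvAStep []

-- ===== PORT B =====

-- by_artist.setdefault(artist, []).append(mta)
def pvAddTrack (d : List (String × List (List (String × String)))) (artist : String)
    (mta : List (String × String)) : List (String × List (List (String × String))) :=
  match d with
  | [] => [(artist, [mta])]
  | (k, v) :: r => if k == artist then (k, v ++ [mta]) :: r else (k, v) :: pvAddTrack r artist mta

-- body of B's album-deriving loop: state = (seen titles, albums so far)
def pvAlbumStep (artist : String)
    (st : PySem.Set String × List (List (String × String))) (mta : List (String × String)) :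
    PySem.Set String × List (List (String × String)) :=
  if PySem.Set.contains st.1 (pvMetaGet mta "album" "Unknown Album") then st
  else (PySem.Set.add st.1 (pvMetaGet mta "album" "Unknown Album"),
        st.2 ++ [[("title", pvMetaGet mta "album" "Unknown Album"), ("artist_name", artist)]])

def pvAlbums (artist : String) (tracks : List (List (String × String))) :
    List (List (String × String)) :=
  (tracks.foldl (pvAlbumStep artist) (PySem.Set.empty, [])).2

-- result[artist] = {"artists": …, "albums": …, "tracks": tracks}
def pvGroup (artist : String) (tracks : List (List (String × String))) :
    List (String × List (List (String × String))) :=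
  [("artists", [[("name", artist)]]), ("albums", pvAlbums artist tracks), ("tracks", tracks)]

def group_metadata_by_entities_py_alt (metadata : List (List (String × String))) :
    List (String × List (String × List (List (String × String)))) :=
  let byArtist := metadata.foldl
    (fun d mta => pvAddTrack d (pvMetaGet mta "artist" "Unknown Artist") mta) []
  byArtist.map (fun e => (e.1, pvGroup e.1 e.2))

-- ===== PRECONDITION & SPEC =====
def Spec_group_metadata_by_entities_py (metadata : List (List (String × String))) (out : List (String × List (String × List (List (String × String))))) : Prop := out = group_metadata_by_entities_py_alt metadata
instance (metadata : List (List (String × String))) (out : List (String × List (String × List (List (String × String))))) : Decidable (Spec_group_metadata_by_entities_py metadata out) := by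
  unfold Spec_group_metadata_by_entities_py
  refine @instDecidableEqList _ ?_ out _
  intro a b
  refine @instDecidableEqProd _ _ ?_ ?_ a b <;> intro c d
  · infer_instance
  · refine @instDecidableEqList _ ?_ c d
    intro e f
    infer_instance

-- ===== CLAIM (what is proved, stated in full; the proofs are below) =====
def Claim_equal_group_metadata_by_entities_py : Prop := ∀ (metadata : List (List (String × String))), Dom_group_metadata_by_entities_py metadata → Spec_group_metadata_by_entities_py metadata (group_metadata_by_entities_py metadata)

-- ===== LEMMAS AND PROOFS =====

-- the assembly function applied to each by_artist entry
def pvF (e : String × List (List (String × String))) :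
    String × List (String × List (List (String × String))) :=
  (e.1, pvGroup e.1 e.2)

-- invariant of B's album loop: seen is exactly the set of titles of the albums collected
def pvInv (st : PySem.Set String × List (List (String × String))) : Prop :=
  ∀ t, PySem.Set.contains st.1 t = true ↔ t ∈ st.2.map (fun a => pvMetaGet a "title" "")

lemma pvInv_step (artist : String) (mta : List (String × String))
    (st : PySem.Set String × List (List (String × String))) (h : pvInv st) :
    pvInv (pvAlbumStep artist st mta) := by
  unfold pvAlbumStep
  by_cases hc : PySem.Set.contains st.1 (pvMetaGet mta "album" "Unknown Album") = true
  · simp only [hc, if_true]; exact h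
  · have hc' : PySem.Set.contains st.1 (pvMetaGet mta "album" "Unknown Album") = false := by
      simpa using hc
    intro t
    simp only [hc', Bool.false_eq_true, if_false]
    simp only [PySem.Set.contains_iff, PySem.Set.mem_add, List.map_append, List.map_cons,
      List.map_nil, List.mem_append, List.mem_cons, List.not_mem_nil, or_false]
    rw [← PySem.Set.contains_iff, h t]
    simp [pvMetaGet]

lemma pvInv_fold (artist : String) (ts : List (List (String × String)))
    (st : PySem.Set String × List (List (String × String))) (h : pvInv st) :
    pvInv (ts.foldl (pvAlbumStep artist) st) := by
  induction ts generalizing st with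
  | nil => exact h
  | cons m r ih => exact ih _ (pvInv_step artist m st h)

lemma pvInv_init : pvInv (PySem.Set.empty, ([] : List (List (String × String)))) := by
  intro t; simp [PySem.Set.empty]

-- appending one track to B's album fold
lemma pvAlbums_snoc (artist : String) (ts : List (List (String × String)))
    (m : List (String × String)) :
    pvAlbums artist (ts ++ [m]) =
      (if pvMetaGet m "album" "Unknown Album"
            ∈ (pvAlbums artist ts).map (fun a => pvMetaGet a "title" "") then pvAlbums artist ts
       else pvAlbums artist ts ++
            [[("title", pvMetaGet m "album" "Unknown Album"), ("artist_name", artist)]]) := by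
  have hinv := pvInv_fold artist ts _ pvInv_init
  unfold pvAlbums
  rw [List.foldl_append]
  set st := ts.foldl (pvAlbumStep artist) (PySem.Set.empty, []) with hst
  show (pvAlbumStep artist st m).2 = _
  unfold pvAlbumStep
  by_cases hm : pvMetaGet m "album" "Unknown Album"
      ∈ st.2.map (fun a => pvMetaGet a "title" "")
  · rw [(hinv _).2 hm]; simp [hm]
  · have : PySem.Set.contains st.1 (pvMetaGet m "album" "Unknown Album") = false := by
      by_contra h
      exact hm ((hinv _).1 (by simpa using h))
    rw [this]; simp [hm]

-- core: A's per-entry update on an assembled group is assembling the extended track list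
lemma pvAUpdate_group (a : String) (ts : List (List (String × String)))
    (m : List (String × String)) :
    pvAUpdate a (pvMetaGet m "album" "Unknown Album") m (a, pvGroup a ts)
      = (a, pvGroup a (ts ++ [m])) := by
  unfold pvAUpdate pvGroup
  simp only [BEq.rfl, if_true]
  rw [pvAlbums_snoc]
  by_cases hm : pvMetaGet m "album" "Unknown Album"
      ∈ (pvAlbums a ts).map (fun alb => pvMetaGet alb "title" "")
  · simp [pvGetG, pvSetG, hm]
  · simp [pvGetG, pvSetG, hm]

-- entries of other artists are untouched
lemma pvAUpdate_ne (a album : String) (m : List (String × String))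
    (e : String × List (String × List (List (String × String)))) (h : e.1 ≠ a) :
    pvAUpdate a album m e = e := by
  unfold pvAUpdate
  simp [h]

lemma pvMap_update_id (a album : String) (m : List (String × String))
    (l : List (String × List (String × List (List (String × String)))))
    (h : ∀ e ∈ l, e.1 ≠ a) : l.map (pvAUpdate a album m) = l := by
  induction l with
  | nil => rfl
  | cons x r ih =>
    simp only [List.map_cons, pvAUpdate_ne a album m x (h x (by simp)),
      ih (fun e he => h e (by simp [he])), List.cons.injEq, and_self]

-- keys of by_artist after one insertion
lemma pvAddTrack_keys (d : List (String × List (List (String × String)))) (a : String)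
    (m : List (String × String)) :
    (pvAddTrack d a m).map Prod.fst =
      (if a ∈ d.map Prod.fst then d.map Prod.fst else d.map Prod.fst ++ [a]) := by
  induction d with
  | nil => simp [pvAddTrack]
  | cons x r ih =>
    obtain ⟨k, v⟩ := x
    by_cases hk : k = a
    · subst hk; simp [pvAddTrack]
    · have : (k == a) = false := by simp [hk]
      simp only [pvAddTrack, this, Bool.false_eq_true, if_false, List.map_cons, ih,
        List.mem_cons]
      by_cases hm : a ∈ r.map Prod.fst
      · simp [hm, hk, Ne.symm hk]
      · simp [hm, hk, Ne.symm hk]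

lemma pvAddTrack_not_mem (d : List (String × List (List (String × String)))) (a : String)
    (m : List (String × String)) (h : a ∉ d.map Prod.fst) :
    pvAddTrack d a m = d ++ [(a, [m])] := by
  induction d with
  | nil => rfl
  | cons x r ih =>
    obtain ⟨k, v⟩ := x
    simp only [List.map_cons, List.mem_cons, not_or] at h
    have hk : (k == a) = false := by
      simp [Ne.symm h.1]
    simp only [pvAddTrack, hk, Bool.false_eq_true, if_false, List.cons_append,
      List.cons.injEq, true_and]
    exact ih h.2

-- the update pass over assembled entries, when the artist is already present
lemma pvMap_update_addTrack (a : String) (m : List (String × String))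
    (d : List (String × List (List (String × String))))
    (hnd : (d.map Prod.fst).Nodup) (hmem : a ∈ d.map Prod.fst) :
    (d.map pvF).map (pvAUpdate a (pvMetaGet m "album" "Unknown Album") m)
      = (pvAddTrack d a m).map pvF := by
  induction d with
  | nil => simp at hmem
  | cons x r ih =>
    obtain ⟨k, ts⟩ := x
    simp only [List.map_cons, List.nodup_cons] at hnd hmem ⊢
    by_cases hk : k = a
    · subst hk
      have hr : ∀ e ∈ r.map pvF, e.1 ≠ k := by
        intro e he
        simp only [List.mem_map] at he
        obtain ⟨p, hp, hpe⟩ := he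
        intro hek
        exact hnd.1 (by rw [← hpe] at hek; rw [← hek]; exact List.mem_map_of_mem hp)
      simp only [pvAddTrack, BEq.rfl, if_true, List.map_cons]
      rw [pvMap_update_id _ _ _ _ hr]
      congr 1
      exact pvAUpdate_group k ts m
    · have hbk : (k == a) = false := by simp [hk]
      have hmr : a ∈ r.map Prod.fst := by
        rcases List.mem_cons.1 hmem with h1 | h2
        · exact absurd h1.symm hk
        · exact h2
      simp only [pvAddTrack, hbk, Bool.false_eq_true, if_false, List.map_cons]
      rw [pvAUpdate_ne _ _ _ _ (by simpa [pvF] using hk)]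
      rw [ih hnd.2 hmr]

-- one loop iteration of A equals one insertion of B, through the assembly map
lemma pvStep_comm (d : List (String × List (List (String × String))))
    (hnd : (d.map Prod.fst).Nodup) (m : List (String × String)) :
    pvAStep (d.map pvF) m
      = (pvAddTrack d (pvMetaGet m "artist" "Unknown Artist") m).map pvF := by
  set a := pvMetaGet m "artist" "Unknown Artist" with ha
  have hany : ((d.map pvF).any (fun e => e.1 == a)) = (decide (a ∈ d.map Prod.fst)) := by
    simp only [List.any_map]
    by_cases hm : a ∈ d.map Prod.fst
    · simp only [hm, decide_true, List.any_eq_true]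
      obtain ⟨p, hp, hpa⟩ := List.mem_map.1 hm
      exact ⟨p, hp, by simp [Function.comp, pvF, hpa]⟩
    · simp only [hm, decide_false, List.any_eq_false]
      intro p hp
      simp only [Function.comp, pvF, beq_iff_eq]
      intro hpa
      exact hm (by rw [← hpa]; exact List.mem_map_of_mem hp)
  by_cases hm : a ∈ d.map Prod.fst
  · unfold pvAStep
    rw [← ha, hany]
    simp only [hm, decide_true, if_true]
    exact pvMap_update_addTrack a m d hnd hm
  · unfold pvAStep
    rw [← ha, hany]
    simp only [hm, decide_false, Bool.false_eq_true, if_false, List.map_append]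
    rw [pvAddTrack_not_mem d a m hm, List.map_append]
    congr 1
    · rw [pvMap_update_id]
      intro e he
      simp only [List.mem_map] at he
      obtain ⟨p, hp, hpe⟩ := he
      intro hea
      exact hm (by rw [← hpe] at hea; rw [← hea]; exact List.mem_map_of_mem hp)
    · simp only [List.map_cons, List.map_nil]
      congr 1
      have : pvAlbums a [m] =
          [[("title", pvMetaGet m "album" "Unknown Album"), ("artist_name", a)]] := by
        unfold pvAlbums pvAlbumStep
        simp [PySem.Set.empty]
      simp [pvAUpdate, pvF, pvGroup, pvGetG, pvSetG, this]

lemma pvAddTrack_nodup (d : List (String × List (List (String × String)))) (a : String)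
    (m : List (String × String)) (hnd : (d.map Prod.fst).Nodup) :
    ((pvAddTrack d a m).map Prod.fst).Nodup := by
  rw [pvAddTrack_keys]
  by_cases hm : a ∈ d.map Prod.fst
  · simpa [hm] using hnd
  · simp only [hm, if_false]
    exact List.Nodup.append hnd (List.nodup_singleton a) (by simpa using hm)

lemma pvMain (md : List (List (String × String)))
    (d : List (String × List (List (String × String)))) (hnd : (d.map Prod.fst).Nodup) :
    md.foldl pvAStep (d.map pvF)
      = (md.foldl (fun d mta => pvAddTrack d (pvMetaGet mta "artist" "Unknown Artist") mta) d).map pvF := by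
  induction md generalizing d with
  | nil => rfl
  | cons m r ih =>
    simp only [List.foldl_cons]
    rw [pvStep_comm d hnd m]
    exact ih _ (pvAddTrack_nodup d _ m hnd)

-- ===== VERDICT (by name: the statement is the Claim_ definition above) =====
theorem group_metadata_by_entities_py_spec : Claim_equal_group_metadata_by_entities_py := by
  intro metadata _
  unfold Spec_group_metadata_by_entities_py group_metadata_by_entities_py
    group_metadata_by_entities_py_alt
  simpa using pvMain metadata [] (by simp)
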